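-- pv_equiv track=rewrite | github.com/qalle2/qromp | qromp.py | ips_enc_generate_blocks
-- ===== SOURCE A (Python) =====
-- def ips_enc_generate_blocks(data1, data2):
--     # generate (start, length) of blocks that differ; length <= 0xffff; address may be "EOF"
--     # TODO: perhaps handle splits in a more efficient manner?
--
--     start = -1  # start position of current block (-1 = none)
--
--     # note: pos has an extra value at the end for wrapping things up
--     for pos in range(len(data1) + 1):
--         if start == -1 and pos < len(data1) and data1[pos] != data2[pos]:
--             # start a block
--             start = pos
--         elif start != -1 and (pos == len(data1) or data1[pos] == data2[pos]):
--             # end a block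
--             yield (start, pos - start)
--             start = -1
--         elif start != -1 and pos - start == 0xffff:
--             # break up a long block
--             yield (start, pos - start)
--             start = pos
-- ===== SOURCE B (Python) =====
-- def ips_enc_generate_blocks(data1, data2):
--     # Same blocks as the original, but run-detection is separated from chunking:
--     # find each maximal differing run [start, pos), then emit it in <=0xffff chunks.
--     n = len(data1)
--     pos = 0
--     while pos < n:
--         if data1[pos] != data2[pos]:
--             start = pos
--             pos += 1
--             while pos < n and data1[pos] != data2[pos]:
--                 pos += 1
--             length = pos - start
--             for off in range(0, length, 0xffff):
--                 yield (start + off, min(0xffff, length - off))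
--         else:
--             pos += 1
-- ===== Notes on version B (the rewrite author's own statement) =====
-- stated objective: alternative
-- what changed: Replaces the single three-branch state machine (start sentinel -1, extra wrap-up iteration) by two separated phases: a lazy scan that finds each maximal differing run, then a nested range loop that splits the run into <=0xffff chunks.
import Mathlib
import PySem

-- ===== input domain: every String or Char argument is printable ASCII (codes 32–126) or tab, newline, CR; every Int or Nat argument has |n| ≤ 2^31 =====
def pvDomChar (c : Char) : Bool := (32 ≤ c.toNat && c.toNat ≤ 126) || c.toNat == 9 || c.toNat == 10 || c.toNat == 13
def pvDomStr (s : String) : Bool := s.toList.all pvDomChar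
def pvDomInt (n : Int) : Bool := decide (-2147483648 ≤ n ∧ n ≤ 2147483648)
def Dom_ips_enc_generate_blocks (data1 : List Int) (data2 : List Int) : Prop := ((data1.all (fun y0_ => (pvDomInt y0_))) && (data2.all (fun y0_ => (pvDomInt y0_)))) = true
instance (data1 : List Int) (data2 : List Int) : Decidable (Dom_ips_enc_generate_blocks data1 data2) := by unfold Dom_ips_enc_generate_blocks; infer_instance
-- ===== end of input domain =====

-- B separates run-detection from chunking instead of A's three-branch state machine; return
-- values proved equal whenever data2 is at least as long as data1 (elsewhere the Python raises).

-- ===== PORT A =====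
-- Python A reads data1[pos] and data2[pos] for every pos < len(data1); Pre_ below keeps both
-- accesses in range, so getD's default 0 is never read on admitted inputs.
def ipsA_go (data1 data2 : List Int) (n : Nat) (start : Int) : List Nat → List (Int × Int)
  | [] => []
  | pos :: rest =>
    if start = -1 ∧ pos < n ∧ data1.getD pos 0 ≠ data2.getD pos 0 then
      -- start a block
      ipsA_go data1 data2 n (pos : Int) rest
    else if start ≠ -1 ∧ (pos = n ∨ data1.getD pos 0 = data2.getD pos 0) then
      -- end a block
      (start, (pos : Int) - start) :: ipsA_go data1 data2 n (-1) rest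
    else if start ≠ -1 ∧ (pos : Int) - start = 65535 then
      -- break up a long block
      (start, (pos : Int) - start) :: ipsA_go data1 data2 n (pos : Int) rest
    else
      ipsA_go data1 data2 n start rest

def ips_enc_generate_blocks (data1 : List Int) (data2 : List Int) : List (Int × Int) :=
  ipsA_go data1 data2 data1.length (-1) (List.range (data1.length + 1))

-- ===== PORT B =====
-- inner while: extend the run while bytes differ
def ipsB_runEnd (data1 data2 : List Int) (pos : Nat) : Nat :=
  if pos < data1.length ∧ data1.getD pos 0 ≠ data2.getD pos 0 then
    ipsB_runEnd data1 data2 (pos + 1)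
  else pos
termination_by data1.length - pos
decreasing_by omega

-- needed by ipsB_scan's termination proof
lemma ipsB_runEnd_ge (data1 data2 : List Int) (pos : Nat) : pos ≤ ipsB_runEnd data1 data2 pos := by
  fun_induction ipsB_runEnd data1 data2 pos with
  | case1 p h ih => omega
  | case2 p h => omega

-- for off in range(0, length, 0xffff): yield (start + off, min(0xffff, length - off))
def ipsB_chunks (start : Nat) (length : Int) : List (Int × Int) :=
  (PySem.List.pyRange 0 length 65535).map
    (fun off => ((start : Int) + off, min 65535 (length - off)))

-- outer while over pos
def ipsB_scan (data1 data2 : List Int) (pos : Nat) : List (Int × Int) :=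
  if pos < data1.length then
    if data1.getD pos 0 ≠ data2.getD pos 0 then
      ipsB_chunks pos ((ipsB_runEnd data1 data2 (pos + 1) : Int) - pos) ++
        ipsB_scan data1 data2 (ipsB_runEnd data1 data2 (pos + 1))
    else
      ipsB_scan data1 data2 (pos + 1)
  else []
termination_by data1.length - pos
decreasing_by
  · have := ipsB_runEnd_ge data1 data2 (pos + 1); omega
  · omega

def ips_enc_generate_blocks_alt (data1 : List Int) (data2 : List Int) : List (Int × Int) :=
  ipsB_scan data1 data2 0

-- ===== PRECONDITION & SPEC =====
-- Pre_ excludes exactly the inputs where the Python A raises IndexError (data2 shorter than data1).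
def Pre_ips_enc_generate_blocks (data1 : List Int) (data2 : List Int) : Prop :=
  data1.length ≤ data2.length
instance (data1 : List Int) (data2 : List Int) : Decidable (Pre_ips_enc_generate_blocks data1 data2) := by unfold Pre_ips_enc_generate_blocks; infer_instance

def pvWitness_ips_enc_generate_blocks : List Int × List Int := ([1, 2, 3], [1, 0, 3])

def Spec_ips_enc_generate_blocks (data1 : List Int) (data2 : List Int) (out : List (Int × Int)) : Prop := out = ips_enc_generate_blocks_alt data1 data2
instance (data1 : List Int) (data2 : List Int) (out : List (Int × Int)) : Decidable (Spec_ips_enc_generate_blocks data1 data2 out) := by unfold Spec_ips_enc_generate_blocks; infer_instance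

-- ===== CLAIM (what is proved, stated in full; the proofs are below) =====
def Claim_equal_ips_enc_generate_blocks : Prop := ∀ (data1 : List Int) (data2 : List Int), Dom_ips_enc_generate_blocks data1 data2 → Pre_ips_enc_generate_blocks data1 data2 → Spec_ips_enc_generate_blocks data1 data2 (ips_enc_generate_blocks data1 data2)

-- ===== LEMMAS AND PROOFS =====

lemma ipsB_runEnd_stop (data1 data2 : List Int) (pos : Nat)
    (h : ¬(pos < data1.length ∧ data1.getD pos 0 ≠ data2.getD pos 0)) :
    ipsB_runEnd data1 data2 pos = pos := by
  rw [ipsB_runEnd, if_neg h]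

lemma ipsB_runEnd_step (data1 data2 : List Int) (pos : Nat)
    (h : pos < data1.length ∧ data1.getD pos 0 ≠ data2.getD pos 0) :
    ipsB_runEnd data1 data2 pos = ipsB_runEnd data1 data2 (pos + 1) := by
  rw [ipsB_runEnd, if_pos h]

lemma ipsB_chunks_small (s : Nat) (L : Int) (h1 : 0 < L) (h2 : L ≤ 65535) :
    ipsB_chunks s L = [((s : Int), L)] := by
  unfold ipsB_chunks
  rw [PySem.List.pyRange_of_pos 0 L (by norm_num), if_pos (by omega)]
  have hc : ((L - 0 + 65535 - 1) / 65535).toNat = 1 := by omega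
  rw [hc]
  simp [min_eq_right h2]

lemma ipsB_chunks_big (s : Nat) (L : Int) (h : 65535 < L) :
    ipsB_chunks s L = ((s : Int), 65535) :: ipsB_chunks (s + 65535) (L - 65535) := by
  unfold ipsB_chunks
  rw [PySem.List.pyRange_of_pos 0 L (by norm_num),
      PySem.List.pyRange_of_pos 0 (L - 65535) (by norm_num),
      if_pos (by omega), if_pos (by omega)]
  have hc : ((L - 0 + 65535 - 1) / 65535).toNat = ((L - 65535 - 0 + 65535 - 1) / 65535).toNat + 1 := by
    omega
  rw [hc, List.range_succ_eq_map]
  simp only [List.map_cons, List.map_map]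
  congr 1
  · simp
    omega
  · refine List.map_congr_left fun k _ => ?_
    simp only [Function.comp_apply, Prod.mk.injEq]
    refine ⟨by push_cast; ring, ?_⟩
    congr 1
    push_cast
    ring

-- the combined loop invariant: S(p) (no current block) and R(p, s) (block open since s)
lemma ips_main (data1 data2 : List Int) : ∀ (k p : Nat), p + k = data1.length →
    (ipsA_go data1 data2 data1.length (-1) (List.range' p (data1.length + 1 - p)) =
      ipsB_scan data1 data2 p) ∧
    (∀ s : Nat, s < p → (p : Int) - s ≤ 65535 →
      ipsA_go data1 data2 data1.length (s : Int) (List.range' p (data1.length + 1 - p)) =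
        ipsB_chunks s ((ipsB_runEnd data1 data2 p : Int) - s) ++
          ipsB_scan data1 data2 (ipsB_runEnd data1 data2 p)) := by
  intro k
  induction k with
  | zero =>
    intro p hp
    -- p = data1.length: the wrap-up iteration
    have hpn : p = data1.length := by omega
    have hlist : List.range' p (data1.length + 1 - p) = [p] := by
      rw [hpn]; simp
    have hend : ipsB_runEnd data1 data2 p = p :=
      ipsB_runEnd_stop data1 data2 p (by omega)
    have hscan : ipsB_scan data1 data2 p = [] := by
      rw [ipsB_scan, if_neg (by omega)]
    constructor
    · rw [hlist, ipsA_go.eq_2,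
        if_neg (by rintro ⟨-, h, -⟩; omega),
        if_neg (by rintro ⟨h, -⟩; exact h rfl),
        if_neg (by rintro ⟨h, -⟩; exact h rfl)]
      rw [hscan, ipsA_go]
    · intro s hs hs2
      rw [hlist, ipsA_go.eq_2,
        if_neg (by rintro ⟨h, -⟩; omega),
        if_pos ⟨by omega, Or.inl hpn⟩]
      rw [hend, hscan, ipsB_chunks_small s ((p : Int) - s) (by omega) hs2, ipsA_go]
      simp
  | succ k ih =>
    intro p hp
    have hplt : p < data1.length := by omega
    have ih' := ih (p + 1) (by omega)
    have hlist : List.range' p (data1.length + 1 - p) =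
        p :: List.range' (p + 1) (data1.length + 1 - (p + 1)) := by
      have h1 : data1.length + 1 - p = (data1.length + 1 - (p + 1)) + 1 := by omega
      rw [h1, List.range'_succ]
    by_cases hd : data1.getD p 0 ≠ data2.getD p 0
    · -- bytes differ at p
      have hstep : ipsB_runEnd data1 data2 p = ipsB_runEnd data1 data2 (p + 1) :=
        ipsB_runEnd_step data1 data2 p ⟨hplt, hd⟩
      have hscan : ipsB_scan data1 data2 p =
          ipsB_chunks p ((ipsB_runEnd data1 data2 (p + 1) : Int) - p) ++
            ipsB_scan data1 data2 (ipsB_runEnd data1 data2 (p + 1)) := by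
        rw [ipsB_scan, if_pos hplt, if_pos hd]
      constructor
      · -- S(p): start a block
        rw [hlist, ipsA_go.eq_2, if_pos ⟨rfl, hplt, hd⟩, hscan]
        exact ih'.2 p (by omega) (by push_cast; omega)
      · intro s hs hs2
        rw [hlist, ipsA_go.eq_2,
          if_neg (by rintro ⟨h, -⟩; omega),
          if_neg (by rintro ⟨-, h | h⟩; exacts [by omega, hd h])]
        by_cases hfull : (p : Int) - s = 65535
        · -- break up a long block
          rw [if_pos ⟨by omega, hfull⟩, hstep]
          rw [ih'.2 p (by omega) (by push_cast; omega)]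
          have hge : p + 1 ≤ ipsB_runEnd data1 data2 (p + 1) :=
            ipsB_runEnd_ge data1 data2 (p + 1)
          rw [ipsB_chunks_big s ((ipsB_runEnd data1 data2 (p + 1) : Int) - s) (by omega)]
          have hsp : s + 65535 = p := by omega
          have hhead : (((s : Nat) : Int), ((p : Nat) : Int) - ((s : Nat) : Int)) = (((s : Nat) : Int), (65535 : Int)) := by
            rw [hfull]
          have htail : ipsB_chunks p ((ipsB_runEnd data1 data2 (p + 1) : Int) - (p : Int)) =
              ipsB_chunks (s + 65535) ((ipsB_runEnd data1 data2 (p + 1) : Int) - (s : Int) - 65535) := by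
            rw [hsp]
            congr 1
            omega
          rw [List.cons_append, hhead, htail]
        · -- continue the block
          rw [if_neg (by rintro ⟨-, h⟩; exact hfull h), hstep]
          exact ih'.2 s (by omega) (by push_cast; omega)
    · -- bytes equal at p
      rw [not_not] at hd
      have hend : ipsB_runEnd data1 data2 p = p :=
        ipsB_runEnd_stop data1 data2 p (by rintro ⟨-, h⟩; exact h hd)
      have hscan : ipsB_scan data1 data2 p = ipsB_scan data1 data2 (p + 1) := by
        rw [ipsB_scan, if_pos hplt, if_neg (not_not_intro hd)]
      constructor
      · rw [hlist, ipsA_go.eq_2,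
          if_neg (by rintro ⟨-, -, h⟩; exact h hd),
          if_neg (by rintro ⟨h, -⟩; exact h rfl),
          if_neg (by rintro ⟨h, -⟩; exact h rfl)]
        rw [hscan]
        exact ih'.1
      · intro s hs hs2
        rw [hlist, ipsA_go.eq_2,
          if_neg (by rintro ⟨h, -⟩; omega),
          if_pos ⟨by omega, Or.inr hd⟩]
        rw [hend, hscan, ipsB_chunks_small s ((p : Int) - s) (by omega) hs2,
          List.singleton_append, ih'.1]

-- ===== VERDICT (by name: the statement is the Claim_ definition above) =====
theorem ips_enc_generate_blocks_spec : Claim_equal_ips_enc_generate_blocks := by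
  intro data1 data2 _ _
  unfold Spec_ips_enc_generate_blocks ips_enc_generate_blocks ips_enc_generate_blocks_alt
  have h := (ips_main data1 data2 data1.length 0 (by omega)).1
  rw [List.range_eq_range']
  simpa using h
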